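-- pv_equiv track=rewrite | github.com/vinhnt120501/AI4BI | web_app/backend/db.py | _render_schema_context
-- ===== SOURCE A (Python) =====
-- def _fallback_column_description(column_name: str) -> str:
--     return f"Mô tả: dữ liệu của cột `{column_name}`."
--
-- def _render_schema_context(rows: list[tuple[str, str, str, str]]) -> str:
--     """
--     rows: (table_name, column_name, data_type, column_comment)
--     """
--     lines = []
--     current_table = None
--     for table_name, column_name, data_type, column_comment in rows:
--         if table_name != current_table:
--             if current_table is not None:
--                 lines.append("")
--             lines.append(f"TABLE: `{table_name}`")
--             current_table = table_name
--         description = (column_comment or "").strip() or _fallback_column_description(column_name)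
--         lines.append(f"- `{column_name}` | type={data_type} | {description}")
--     return "\n".join(lines).strip()
-- ===== SOURCE B (Python) =====
-- def _fallback_column_description(column_name: str) -> str:
--     return f"Mô tả: dữ liệu của cột `{column_name}`."
--
-- def _render_schema_context(rows: list[tuple[str, str, str, str]]) -> str:
--     # Phase 1: group consecutive rows that share a table name.
--     groups: list[list[tuple[str, str, str, str]]] = []
--     for row in rows:
--         if groups and groups[-1][0][0] == row[0]:
--             groups[-1].append(row)
--         else:
--             groups.append([row])
--     # Phase 2: render each group as one block, then join blocks with a blank line.
--     blocks = []
--     for g in groups: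
--         lines = [f"TABLE: `{g[0][0]}`"]
--         for _, column_name, data_type, column_comment in g:
--             description = (column_comment or "").strip() or _fallback_column_description(column_name)
--             lines.append(f"- `{column_name}` | type={data_type} | {description}")
--         blocks.append("\n".join(lines))
--     return "\n\n".join(blocks).strip()
-- ===== Notes on version B (the rewrite author's own statement) =====
-- stated objective: idiomatic
-- what changed: Replaces the single-pass current_table state machine that interleaves blank separator lines into one flat list with a two-phase decomposition: first group consecutive rows by table name, then render each group as a block and join blocks with '\n\n'.
import Mathlib
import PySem

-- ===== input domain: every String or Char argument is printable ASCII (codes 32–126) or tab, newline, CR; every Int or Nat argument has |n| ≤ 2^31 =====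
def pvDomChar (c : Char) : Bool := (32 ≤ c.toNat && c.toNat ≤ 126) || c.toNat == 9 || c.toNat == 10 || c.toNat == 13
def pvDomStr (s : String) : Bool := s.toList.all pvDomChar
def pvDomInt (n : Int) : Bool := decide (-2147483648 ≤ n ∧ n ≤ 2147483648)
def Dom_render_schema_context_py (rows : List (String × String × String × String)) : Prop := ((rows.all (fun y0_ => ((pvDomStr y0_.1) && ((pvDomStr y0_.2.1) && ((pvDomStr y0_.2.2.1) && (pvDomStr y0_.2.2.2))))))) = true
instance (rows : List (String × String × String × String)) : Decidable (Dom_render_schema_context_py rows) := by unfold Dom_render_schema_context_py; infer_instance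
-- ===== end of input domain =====

-- B renders the same text by a different decomposition: instead of A's one-pass state machine over
-- (lines, current_table) that interleaves blank separator lines, B first groups consecutive rows by
-- table name, renders each group as a block, and joins the blocks with "\n\n".

-- ===== PORT A =====
-- shared text builders (the same f-string text appears verbatim in both Pythons)
def pvFallbackDesc (cn : List Char) : List Char :=
  "Mô tả: dữ liệu của cột `".toList ++ cn ++ "`.".toList

def pvTableLine (tn : List Char) : List Char :=
  "TABLE: `".toList ++ tn ++ "`".toList

-- description = (column_comment or "").strip() or _fallback_column_description(column_name)
def pvDesc (cn cc : List Char) : List Char :=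
  let d := PySem.Chars.strip (if cc = [] then [] else cc)
  if d = [] then pvFallbackDesc cn else d

-- f"- `{column_name}` | type={data_type} | {description}"
def pvColOf (r : String × String × String × String) : List Char :=
  "- `".toList ++ r.2.1.toList ++ "` | type=".toList ++ r.2.2.1.toList ++ " | ".toList
    ++ pvDesc r.2.1.toList r.2.2.2.toList

-- A's loop body: state = (lines, current_table)
def pvStepA (st : List (List Char) × Option String) (r : String × String × String × String) :
    List (List Char) × Option String :=
  let (lines, cur) :=
    if some r.1 ≠ st.2 then
      ((if st.2 ≠ none then st.1 ++ [[]] else st.1) ++ [pvTableLine r.1.toList], some r.1)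
    else (st.1, st.2)
  (lines ++ [pvColOf r], cur)

def render_schema_context_py (rows : List (String × String × String × String)) : String :=
  String.ofList (PySem.Chars.strip (PySem.Chars.join ['\n'] (rows.foldl pvStepA ([], none)).1))

-- ===== PORT B =====
-- phase 1: group consecutive rows sharing a table name ('if groups and groups[-1][0][0] == row[0]')
def pvStepB (gs : List (List (String × String × String × String)))
    (row : String × String × String × String) :
    List (List (String × String × String × String)) :=
  match gs.getLast? with
  | some g =>
      if g.head?.map (fun r => r.1) = some row.1 then gs.dropLast ++ [g ++ [row]]
      else gs ++ [[row]]
  | none => gs ++ [[row]]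

-- phase 2: one block per group = header line plus one line per row, joined by "\n"
def pvBlockB (g : List (String × String × String × String)) : List Char :=
  match g with
  | [] => []
  | r :: _ => PySem.Chars.join ['\n'] (pvTableLine r.1.toList :: g.map pvColOf)

def render_schema_context_py_alt (rows : List (String × String × String × String)) : String :=
  String.ofList (PySem.Chars.strip
    (PySem.Chars.join ['\n', '\n'] ((rows.foldl pvStepB []).map pvBlockB)))

-- ===== PRECONDITION & SPEC =====
def Spec_render_schema_context_py (rows : List (String × String × String × String)) (out : String) : Prop := out = render_schema_context_py_alt rows
instance (rows : List (String × String × String × String)) (out : String) : Decidable (Spec_render_schema_context_py rows out) := by unfold Spec_render_schema_context_py; infer_instance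

-- ===== CLAIM (what is proved, stated in full; the proofs are below) =====
def Claim_equal_render_schema_context_py : Prop := ∀ (rows : List (String × String × String × String)), Dom_render_schema_context_py rows → Spec_render_schema_context_py rows (render_schema_context_py rows)

-- ===== LEMMAS AND PROOFS =====

-- A's flat `lines` list, seen as blocks-of-lines separated by one empty line
def pvCat : List (List (List Char)) → List (List Char)
  | [] => []
  | [x] => x
  | x :: y :: t => x ++ [] :: pvCat (y :: t)

-- the lines of one block
def pvBlockLines (g : List (String × String × String × String)) : List (List Char) :=
  match g with
  | [] => []
  | r :: _ => pvTableLine r.1.toList :: g.map pvColOf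

-- A's current_table, read off the group list: table of the head of the last group
def pvCurOf (gs : List (List (String × String × String × String))) : Option String :=
  gs.getLast?.bind (fun g => g.head?.map (fun r => r.1))

lemma pvBlockB_eq (g : List (String × String × String × String)) :
    pvBlockB g = PySem.Chars.join ['\n'] (pvBlockLines g) := by
  cases g <;> simp [pvBlockB, pvBlockLines, PySem.Chars.join_nil]

lemma pvCat_concat_concat (xs : List (List (List Char))) (y z : List (List Char)) :
    pvCat (xs ++ [y ++ z]) = pvCat (xs ++ [y]) ++ z := by
  induction xs with
  | nil => simp [pvCat]
  | cons a t ih => cases t <;> simp_all [pvCat]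

lemma pvCat_concat_of_ne_nil (xs : List (List (List Char))) (y : List (List Char))
    (h : xs ≠ []) : pvCat (xs ++ [y]) = pvCat xs ++ [] :: y := by
  induction xs with
  | nil => exact absurd rfl h
  | cons a t ih =>
    cases t with
    | nil => simp [pvCat]
    | cons b t' => simp_all [pvCat]

lemma pvJoin_cons_of_ne_nil (sep x : List Char) (xs : List (List Char)) (h : xs ≠ []) :
    PySem.Chars.join sep (x :: xs) = x ++ sep ++ PySem.Chars.join sep xs := by
  cases xs with
  | nil => exact absurd rfl h
  | cons b t => exact PySem.Chars.join_cons_cons sep x b t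

lemma pvJoin_append_of_ne_nil (sep : List Char) (as bs : List (List Char))
    (ha : as ≠ []) (hb : bs ≠ []) :
    PySem.Chars.join sep (as ++ bs) = PySem.Chars.join sep as ++ sep ++ PySem.Chars.join sep bs := by
  induction as with
  | nil => exact absurd rfl ha
  | cons a t ih =>
    cases t with
    | nil =>
      simp [PySem.Chars.join_singleton, pvJoin_cons_of_ne_nil sep a bs hb]
    | cons b t' =>
      have : (b :: t') ++ bs = b :: (t' ++ bs) := rfl
      rw [List.cons_append, pvJoin_cons_of_ne_nil sep a ((b :: t') ++ bs) (by simp),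
        ih (by simp), PySem.Chars.join_cons_cons]
      simp [List.append_assoc]

lemma pvCat_ne_nil (y : List (List Char)) (t : List (List (List Char))) (hy : y ≠ []) :
    pvCat (y :: t) ≠ [] := by
  cases t <;> simp [pvCat, hy]

lemma pvJoinCat (xss : List (List (List Char))) (h : ∀ x ∈ xss, x ≠ []) :
    PySem.Chars.join ['\n'] (pvCat xss)
      = PySem.Chars.join ['\n', '\n'] (xss.map (PySem.Chars.join ['\n'])) := by
  induction xss with
  | nil => simp [pvCat, PySem.Chars.join_nil]
  | cons x t ih =>
    cases t with
    | nil => simp [pvCat, PySem.Chars.join_singleton]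
    | cons y t' =>
      have hx : x ≠ [] := h x (by simp)
      have hy : y ≠ [] := h y (by simp)
      have hrest : ∀ a ∈ y :: t', a ≠ [] := fun a ha => h a (by simp [ha])
      have hcat : pvCat (y :: t') ≠ [] := pvCat_ne_nil y t' hy
      show PySem.Chars.join ['\n'] (x ++ [] :: pvCat (y :: t')) = _
      rw [pvJoin_append_of_ne_nil ['\n'] x ([] :: pvCat (y :: t')) hx (by simp),
        pvJoin_cons_of_ne_nil ['\n'] [] (pvCat (y :: t')) hcat, ih hrest]
      simp [PySem.Chars.join_cons_cons, List.append_assoc]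

-- the simulation step: A's (lines, current_table) is pvCat/pvCurOf of B's group list
lemma pvStep_sim (gs : List (List (String × String × String × String)))
    (h : ∀ g ∈ gs, g ≠ []) (r : String × String × String × String) :
    pvStepA (pvCat (gs.map pvBlockLines), pvCurOf gs) r
        = (pvCat ((pvStepB gs r).map pvBlockLines), pvCurOf (pvStepB gs r))
      ∧ ∀ g ∈ pvStepB gs r, g ≠ [] := by
  rcases List.eq_nil_or_concat gs with rfl | ⟨ys, g, rfl⟩
  · constructor
    · simp [pvStepA, pvStepB, pvCat, pvCurOf, pvBlockLines]
    · intro g hg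
      simp [pvStepB] at hg
      simp [hg]
  · simp only [List.concat_eq_append] at h ⊢
    obtain ⟨q, qs, rfl⟩ : ∃ q qs, g = q :: qs := by
      rcases g with _ | ⟨q, qs⟩
      · exact absurd rfl (h [] (by simp))
      · exact ⟨q, qs, rfl⟩
    have hcur : pvCurOf (ys ++ [q :: qs]) = some q.1 := by simp [pvCurOf]
    have hstepB : pvStepB (ys ++ [q :: qs]) r
        = if q.1 = r.1 then ys ++ [(q :: qs) ++ [r]] else (ys ++ [q :: qs]) ++ [[r]] := by
      simp [pvStepB]
    by_cases hrq : q.1 = r.1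
    · refine ⟨?_, ?_⟩
      · rw [hstepB, if_pos hrq, hcur]
        have hA : pvStepA (pvCat ((ys ++ [q :: qs]).map pvBlockLines), some q.1) r
            = (pvCat ((ys ++ [q :: qs]).map pvBlockLines) ++ [pvColOf r], some q.1) := by
          simp [pvStepA, hrq]
        rw [hA]
        have hbl : pvBlockLines ((q :: qs) ++ [r]) = pvBlockLines (q :: qs) ++ [pvColOf r] := by
          simp [pvBlockLines]
        rw [Prod.mk.injEq]
        refine ⟨?_, by simp [pvCurOf]⟩
        simp only [List.map_append, List.map_singleton, List.cons_append] at hbl ⊢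
        rw [hbl, pvCat_concat_concat]
      · intro g hg
        rw [hstepB, if_pos hrq] at hg
        rcases List.mem_append.1 hg with hg | hg
        · exact h g (by simp [hg])
        · simp at hg; simp [hg]
    · refine ⟨?_, ?_⟩
      · rw [hstepB, if_neg hrq, hcur]
        have hA : pvStepA (pvCat ((ys ++ [q :: qs]).map pvBlockLines), some q.1) r
            = ((pvCat ((ys ++ [q :: qs]).map pvBlockLines) ++ [[]] ++ [pvTableLine r.1.toList])
                ++ [pvColOf r], some r.1) := by
          have : some r.1 ≠ some q.1 := by simpa using fun e => hrq e.symm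
          simp [pvStepA, this]
        rw [hA]
        rw [Prod.mk.injEq]
        refine ⟨?_, by simp [pvCurOf]⟩
        simp only [List.map_append, List.map_singleton]
        rw [pvCat_concat_of_ne_nil (List.map pvBlockLines ys ++ [pvBlockLines (q :: qs)])
          (pvBlockLines [r]) (by simp)]
        simp [pvBlockLines, List.append_assoc]
      · intro g hg
        rw [hstepB, if_neg hrq] at hg
        rcases List.mem_append.1 hg with hg | hg
        · exact h g hg
        · simp at hg; simp [hg]

lemma pvLoop_sim (rows : List (String × String × String × String)) :
    ∀ gs : List (List (String × String × String × String)), (∀ g ∈ gs, g ≠ []) →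
      rows.foldl pvStepA (pvCat (gs.map pvBlockLines), pvCurOf gs)
          = (pvCat ((rows.foldl pvStepB gs).map pvBlockLines), pvCurOf (rows.foldl pvStepB gs))
        ∧ ∀ g ∈ rows.foldl pvStepB gs, g ≠ [] := by
  induction rows with
  | nil => intro gs h; exact ⟨rfl, h⟩
  | cons r rows ih =>
    intro gs h
    obtain ⟨hstep, hne⟩ := pvStep_sim gs h r
    simpa [List.foldl_cons, hstep] using ih (pvStepB gs r) hne

-- ===== VERDICT (by name: the statement is the Claim_ definition above) =====
theorem render_schema_context_py_spec : Claim_equal_render_schema_context_py := by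
  intro rows _
  show render_schema_context_py rows = render_schema_context_py_alt rows
  unfold render_schema_context_py render_schema_context_py_alt
  obtain ⟨hfold, hne⟩ := pvLoop_sim rows [] (by simp)
  have h0 : pvCat (([] : List (List (String × String × String × String))).map pvBlockLines) = []
    := rfl
  have hcur0 : pvCurOf [] = none := rfl
  rw [← h0, ← hcur0, hfold]
  have hbl : ∀ x ∈ (rows.foldl pvStepB []).map pvBlockLines, x ≠ [] := by
    intro x hx
    rcases List.mem_map.1 hx with ⟨g, hg, rfl⟩
    have := hne g hg
    rcases g with _ | ⟨q, qs⟩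
    · exact absurd rfl this
    · simp [pvBlockLines]
  rw [pvJoinCat ((rows.foldl pvStepB []).map pvBlockLines) hbl, List.map_map]
  have : (PySem.Chars.join ['\n'] ∘ pvBlockLines) = pvBlockB := by
    funext g; rw [Function.comp_apply, ← pvBlockB_eq]
  rw [this]
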